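-- pv_equiv track=rewrite | github.com/MoOo2mini/SSUalgo | 이민희/implement/boj17140.py | func
-- ===== SOURCE A (Python) =====
-- def func(arr) :
--     tmp = []
--     for a in arr :
--         if (a != 0) :
--             tmp.append(a)
--     arr = tmp
--
--     tmp = set()
--     for i in arr :
--         tmp.add((i, arr.count(i)))
--
--     tmp = list(map(list, tmp))
--     tmp = sorted(tmp, key=lambda x : (x[1], x[0]))
--     arr = sum(tmp, [])
--     return arr
-- ===== SOURCE B (Python) =====
-- def func(arr):
--     s = sorted(a for a in arr if a != 0)
--     runs = []                     # run-length encode the sorted list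
--     for v in s:
--         if runs and runs[-1][0] == v:
--             runs[-1][1] += 1
--         else:
--             runs.append([v, 1])
--     runs.sort(key=lambda p: (p[1], p[0]))
--     out = []
--     for p in runs:
--         out += p
--     return out
-- ===== Notes on version B (the rewrite author's own statement) =====
-- stated objective: faster
-- what changed: Replaces A's filter-then-count (arr.count per element inside a set-building loop, quadratic) with sort-then-run-length-encode: sort the non-zero elements, collapse adjacent runs into (value,count) pairs in one pass, then sort the pairs by (count,value) and flatten.
import Mathlib
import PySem

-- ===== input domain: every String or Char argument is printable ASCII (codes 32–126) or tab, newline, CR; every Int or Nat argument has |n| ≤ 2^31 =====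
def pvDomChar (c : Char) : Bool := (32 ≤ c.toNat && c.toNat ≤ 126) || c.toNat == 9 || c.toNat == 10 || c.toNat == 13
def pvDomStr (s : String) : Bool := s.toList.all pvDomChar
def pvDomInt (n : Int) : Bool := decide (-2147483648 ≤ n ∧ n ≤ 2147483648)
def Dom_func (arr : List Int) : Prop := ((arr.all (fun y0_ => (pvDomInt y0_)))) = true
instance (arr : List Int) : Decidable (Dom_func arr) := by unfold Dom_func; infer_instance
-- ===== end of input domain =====

-- B replaces A's per-element arr.count counting with sort-then-run-length-encode (faster).

-- ===== PORT A =====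
def func (arr : List Int) : List Int :=
  let tmp := arr.foldl (fun acc a => if a ≠ 0 then acc ++ [a] else acc) []
  -- set of (i, arr.count(i)) pairs; the Python tuples become pairs (list(map(list, …)) is representational)
  let s : PySem.Set (Int × Int) :=
    tmp.foldl (fun s i => PySem.Set.add s (i, (tmp.count i : Int))) PySem.Set.empty
  -- sorted(tmp, key=lambda x: (x[1], x[0])) — key injective on the set, so the order is hash-order independent
  let srt := PySem.List.sorted2 s (fun x => x.2) (fun x => x.1) false
  -- sum(tmp, [])
  srt.foldl (fun acc x => acc ++ [x.1, x.2]) []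

-- ===== PORT B =====
-- one step of B's run-length loop: mutate the last run's count, or append a new run
def lstep (runs : List (Int × Int)) (v : Int) : List (Int × Int) :=
  match runs.getLast? with
  | some (w, c) => if w == v then runs.dropLast ++ [(w, c + 1)] else runs ++ [(v, 1)]
  | none => [(v, 1)]

def func_alt (arr : List Int) : List Int :=
  let s := PySem.List.sorted (arr.filter (fun a => decide (a ≠ 0))) (fun x => x) false
  let runs := s.foldl lstep []
  let runs2 := PySem.List.sorted2 runs (fun p => p.2) (fun p => p.1) false
  runs2.foldl (fun out p => out ++ [p.1, p.2]) []

-- ===== PRECONDITION & SPEC =====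
def Spec_func (arr : List Int) (out : List Int) : Prop := out = func_alt arr
instance (arr : List Int) (out : List Int) : Decidable (Spec_func arr out) := by unfold Spec_func; infer_instance

-- ===== CLAIM (what is proved, stated in full; the proofs are below) =====
def Claim_equal_func : Prop := ∀ (arr : List Int), Dom_func arr → Spec_func arr (func arr)

-- ===== LEMMAS AND PROOFS =====

-- set(…) of mapped elements commutes with map when f is injective
theorem set_update_map_inj {α β : Type} [BEq α] [LawfulBEq α] [BEq β] [LawfulBEq β]
    (f : α → β) (hf : Function.Injective f) (xs : List α) (s : PySem.Set α) :
    PySem.Set.update (s.map f) (xs.map f) = (PySem.Set.update s xs).map f := by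
  induction xs generalizing s with
  | nil => simp [PySem.Set.update]
  | cons x xs ih =>
    have hadd : PySem.Set.add (s.map f) (f x) = (PySem.Set.add s x).map f := by
      simp only [PySem.Set.add, PySem.Set.contains, List.contains_map]
      have hc : (List.any s fun a => f x == f a) = List.contains s x := by
        rw [Bool.eq_iff_iff, List.any_eq_true, List.contains_iff_exists_mem_beq]
        constructor
        · rintro ⟨a, ha, hb⟩
          exact ⟨a, ha, beq_iff_eq.mpr (hf (beq_iff_eq.mp hb))⟩
        · rintro ⟨a, ha, hb⟩
          exact ⟨a, ha, beq_iff_eq.mpr (congrArg f (beq_iff_eq.mp hb))⟩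
      rw [hc]
      split <;> simp
    rw [List.map_cons, PySem.Set.update_cons, PySem.Set.update_cons, hadd, ih]

theorem set_ofList_map_inj {α β : Type} [BEq α] [LawfulBEq α] [BEq β] [LawfulBEq β]
    (f : α → β) (hf : Function.Injective f) (xs : List α) :
    PySem.Set.ofList (xs.map f) = (PySem.Set.ofList xs).map f := by
  have := set_update_map_inj f hf xs ([] : PySem.Set α)
  simpa [PySem.Set.update_nil_left] using this

-- sorted2 is sorted with the lexicographic pair key
theorem sorted2_eq_sorted_lex {α : Type} (xs : List α) (k1 k2 : α → Int) :
    PySem.List.sorted2 xs k1 k2 false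
      = PySem.List.sorted xs (fun x => toLex (k1 x, k2 x)) false := by
  show List.foldl (fun acc x => PySem.List.insertBy
        (fun a b => decide (k1 a < k1 b) || (!decide (k1 b < k1 a) && decide (k2 a < k2 b))) x acc) [] xs
      = List.foldl (fun acc x => PySem.List.insertBy
        (fun a b => decide (toLex (k1 a, k2 a) < toLex (k1 b, k2 b))) x acc) [] xs
  have hb : (fun a b => decide (k1 a < k1 b) || (!decide (k1 b < k1 a) && decide (k2 a < k2 b)))
      = (fun (a b : α) => decide (toLex (k1 a, k2 a) < toLex (k1 b, k2 b))) := by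
    funext a b
    rw [Bool.eq_iff_iff]
    simp only [Bool.or_eq_true, Bool.and_eq_true, Bool.not_eq_true', decide_eq_true_eq,
      decide_eq_false_iff_not, Prod.Lex.lt_iff, ofLex_toLex]
    constructor
    · rintro (h | ⟨h1, h2⟩)
      · exact Or.inl h
      · rcases lt_or_eq_of_le (le_of_not_gt h1) with h | h
        · exact Or.inl h
        · exact Or.inr ⟨h, h2⟩
    · rintro (h | ⟨h1, h2⟩)
      · exact Or.inl h
      · exact Or.inr ⟨by omega, h2⟩
  rw [hb]

-- run-length encoding from a pending run (w, c)
def rleFrom (w : Int) (c : Int) : List Int → List (Int × Int)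
  | [] => [(w, c)]
  | a :: t => if a == w then rleFrom w (c + 1) t else (w, c) :: rleFrom a 1 t

theorem foldl_lstep_eq_rleFrom (s : List Int) (ps : List (Int × Int)) (w c : Int) :
    s.foldl lstep (ps ++ [(w, c)]) = ps ++ rleFrom w c s := by
  induction s generalizing ps w c with
  | nil => simp [rleFrom]
  | cons a t ih =>
    simp only [List.foldl_cons, lstep, List.getLast?_concat, List.dropLast_concat, rleFrom]
    by_cases h : a = w
    · simp only [h, beq_self_eq_true, if_true]
      exact ih ps w (c + 1)
    · have hb : (w == a) = false := by simp [Ne.symm h]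
      have hb' : (a == w) = false := by simp [h]
      simp only [hb, hb', Bool.false_eq_true, if_false]
      rw [show ps ++ [(w, c)] ++ [(a, 1)] = (ps ++ [(w, c)]) ++ [(a, 1)] by simp,
        ih (ps ++ [(w, c)]) a 1]
      simp

theorem fst_mem_rleFrom (w c : Int) (s : List Int) (i cc : Int)
    (h : (i, cc) ∈ rleFrom w c s) : i = w ∨ i ∈ s := by
  induction s generalizing w c with
  | nil =>
    rw [rleFrom, List.mem_singleton] at h
    exact Or.inl (Prod.mk.inj h).1
  | cons a t ih =>
    rw [rleFrom] at h
    by_cases ha : a = w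
    · subst ha
      simp only [beq_self_eq_true, if_true] at h
      rcases ih a (c + 1) h with h' | h'
      · exact Or.inl h'
      · exact Or.inr (List.mem_cons_of_mem _ h')
    · rw [if_neg (by simp [ha])] at h
      rcases List.mem_cons.mp h with h' | h'
      · exact Or.inl (Prod.mk.inj h').1
      · rcases ih a 1 h' with h'' | h''
        · exact Or.inr (by simp [h''])
        · exact Or.inr (List.mem_cons_of_mem _ h'')

theorem mem_rleFrom_sorted (s : List Int) (w c : Int)
    (hs : s.Pairwise (· ≤ ·)) (hw : ∀ x ∈ s, w ≤ x) (i cc : Int) :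
    (i, cc) ∈ rleFrom w c s ↔
      (i = w ∧ cc = c + (s.count w : Int)) ∨ (i ∈ s ∧ w < i ∧ cc = (s.count i : Int)) := by
  induction s generalizing w c with
  | nil => simp [rleFrom]
  | cons a t ih =>
    have hat : ∀ x ∈ t, a ≤ x := fun x hx => (List.pairwise_cons.mp hs).1 x hx
    have hwa : w ≤ a := hw a (List.mem_cons_self ..)
    have ht : t.Pairwise (· ≤ ·) := (List.pairwise_cons.mp hs).2
    by_cases h : a = w
    · subst h
      rw [rleFrom, if_pos (by simp), ih a (c + 1) ht hat]
      have hca : ((a :: t).count a : Int) = (t.count a : Int) + 1 := by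
        simp [List.count_cons]
      constructor
      · rintro (⟨h1, h2⟩ | ⟨h1, h2, h3⟩)
        · exact Or.inl ⟨h1, by subst h1; rw [hca]; omega⟩
        · have hia : i ≠ a := Ne.symm (ne_of_lt h2)
          refine Or.inr ⟨List.mem_cons_of_mem _ h1, h2, ?_⟩
          rw [show ((a :: t).count i : Int) = (t.count i : Int) by simp [List.count_cons, hia, Ne.symm hia]]
          exact h3
      · rintro (⟨h1, h2⟩ | ⟨h1, h2, h3⟩)
        · exact Or.inl ⟨h1, by subst h1; rw [hca] at h2; omega⟩
        · have hia : i ≠ a := Ne.symm (ne_of_lt h2)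
          have h1t : i ∈ t := by
            rcases List.mem_cons.mp h1 with h' | h'
            · exact absurd h' hia
            · exact h'
          refine Or.inr ⟨h1t, h2, ?_⟩
          rw [show ((a :: t).count i : Int) = (t.count i : Int) by simp [List.count_cons, hia, Ne.symm hia]] at h3
          exact h3
    · have hwa' : w < a := lt_of_le_of_ne hwa (Ne.symm h)
      have hwt : w ∉ a :: t := by
        intro hmem
        rcases List.mem_cons.mp hmem with h' | h'
        · exact h h'.symm
        · exact absurd (hat w h') (not_le.mpr hwa')
      have hcw : ((a :: t).count w : Int) = 0 := by
        simp [List.count_eq_zero_of_not_mem hwt]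
      rw [rleFrom, if_neg (by simp [h]), List.mem_cons, ih a 1 ht hat]
      have hca : ((a :: t).count a : Int) = (t.count a : Int) + 1 := by
        simp [List.count_cons]
      constructor
      · rintro (h' | ⟨h1, h2⟩ | ⟨h1, h2, h3⟩)
        · rcases Prod.mk.inj h' with ⟨h1, h2⟩
          exact Or.inl ⟨h1, by rw [h2, hcw]; omega⟩
        · subst h1
          exact Or.inr ⟨List.mem_cons_self .., hwa', by rw [hca]; omega⟩
        · have hia : i ≠ a := Ne.symm (ne_of_lt h2)
          refine Or.inr ⟨List.mem_cons_of_mem _ h1, lt_trans hwa' h2, ?_⟩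
          rw [show ((a :: t).count i : Int) = (t.count i : Int) by simp [List.count_cons, hia, Ne.symm hia]]
          exact h3
      · rintro (⟨h1, h2⟩ | ⟨h1, h2, h3⟩)
        · subst h1
          rw [hcw] at h2
          exact Or.inl (by rw [h2]; simp)
        · rcases List.mem_cons.mp h1 with h' | h'
          · subst h'
            refine Or.inr (Or.inl ⟨rfl, ?_⟩)
            rw [hca] at h3; omega
          · by_cases hia : i = a
            · subst hia
              refine Or.inr (Or.inl ⟨rfl, ?_⟩)
              rw [hca] at h3; omega
            · refine Or.inr (Or.inr ⟨h', lt_of_le_of_ne (hat i h') (Ne.symm hia), ?_⟩)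
              rw [show ((a :: t).count i : Int) = (t.count i : Int) by simp [List.count_cons, hia, Ne.symm hia]] at h3
              exact h3

theorem nodup_rleFrom (s : List Int) (w c : Int)
    (hs : s.Pairwise (· ≤ ·)) (hw : ∀ x ∈ s, w ≤ x) :
    (rleFrom w c s).Nodup := by
  induction s generalizing w c with
  | nil => simp [rleFrom]
  | cons a t ih =>
    have hat : ∀ x ∈ t, a ≤ x := fun x hx => (List.pairwise_cons.mp hs).1 x hx
    have ht : t.Pairwise (· ≤ ·) := (List.pairwise_cons.mp hs).2
    by_cases h : a = w
    · subst h
      rw [rleFrom]; simp only [beq_self_eq_true, if_true]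
      exact ih a (c + 1) ht hat
    · have hwa' : w < a := lt_of_le_of_ne (hw a (List.mem_cons_self ..)) (Ne.symm h)
      rw [rleFrom]
      have hb : (a == w) = false := by simp [h]
      simp only [hb, if_false]
      refine List.nodup_cons.mpr ⟨?_, ih a 1 ht hat⟩
      intro hmem
      rcases fst_mem_rleFrom a 1 t w c hmem with h' | h'
      · exact absurd h' (Ne.symm (ne_of_gt hwa'))
      · exact absurd (hat w h') (not_le.mpr hwa')

-- ===== VERDICT (by name: the statement is the Claim_ definition above) =====
theorem func_spec : Claim_equal_func := by
  intro arr _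
  unfold Spec_func func func_alt
  have hfilter : arr.foldl (fun acc a => if a ≠ 0 then acc ++ [a] else acc) ([] : List Int)
      = arr.filter (fun a => decide (a ≠ 0)) := by
    simpa using PySem.List.foldl_append_ite_eq_filter (fun a : Int => a ≠ 0) arr []
  set F : List Int := arr.filter (fun a => decide (a ≠ 0)) with hF
  set S : List Int := PySem.List.sorted F (fun x => x) false with hS
  have hperm : S.Perm F := PySem.List.sorted_perm F (fun x => x) false
  have hsorted : S.Pairwise (· ≤ ·) := by
    simpa using PySem.List.sorted_pairwise F (fun x : Int => x)
  have hinj : Function.Injective (fun i : Int => (i, (F.count i : Int))) := by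
    intro a b h
    exact congrArg Prod.fst h
  have hset : F.foldl (fun s i => PySem.Set.add s (i, (F.count i : Int))) PySem.Set.empty
      = (PySem.Set.ofList F).map (fun i : Int => (i, (F.count i : Int))) := by
    rw [← PySem.Set.update_map_eq_foldl_add, PySem.Set.update_empty,
      set_ofList_map_inj _ hinj]
  -- the two pair lists are permutations of each other
  have hpermPairs : (S.foldl lstep []).Perm
      ((PySem.Set.ofList F).map (fun i : Int => (i, (F.count i : Int)))) := by
    have hmemA : ∀ i cc : Int,
        (i, cc) ∈ (PySem.Set.ofList F).map (fun i : Int => (i, (F.count i : Int)))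
          ↔ i ∈ F ∧ cc = (F.count i : Int) := by
      intro i cc
      simp only [List.mem_map, PySem.Set.mem_ofList]
      constructor
      · rintro ⟨j, hj, hji⟩
        rcases Prod.mk.inj hji with ⟨h1, h2⟩
        subst h1; exact ⟨hj, h2.symm⟩
      · rintro ⟨h1, h2⟩
        exact ⟨i, h1, by rw [h2]⟩
    have hnodupA : ((PySem.Set.ofList F).map (fun i : Int => (i, (F.count i : Int)))).Nodup :=
      (PySem.Set.nodup_ofList F).map hinj
    have hcount : ∀ i : Int, S.count i = F.count i := fun i => hperm.count_eq i
    have hmemS : ∀ i : Int, i ∈ S ↔ i ∈ F := fun i => hperm.mem_iff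
    cases hSs : S with
    | nil =>
      have : F = [] := by
        cases hFs : F with
        | nil => rfl
        | cons x xs =>
          exact absurd ((hmemS x).mpr (by rw [hFs]; exact List.mem_cons_self ..))
            (by rw [hSs]; simp)
      simp [this, PySem.Set.ofList, PySem.Set.update]
    | cons v rest =>
      have hrest : rest.Pairwise (· ≤ ·) := (List.pairwise_cons.mp (hSs ▸ hsorted)).2
      have hvrest : ∀ x ∈ rest, v ≤ x := (List.pairwise_cons.mp (hSs ▸ hsorted)).1
      have hfold : (v :: rest).foldl lstep [] = rleFrom v 1 rest := by
        have := foldl_lstep_eq_rleFrom rest [] v 1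
        simpa [lstep] using this
      rw [hfold]
      rw [List.perm_ext_iff_of_nodup (nodup_rleFrom rest v 1 hrest hvrest) hnodupA]
      rintro ⟨i, cc⟩
      rw [hmemA i cc, mem_rleFrom_sorted rest v 1 hrest hvrest i cc]
      have hcv : ((v :: rest).count v : Int) = 1 + (rest.count v : Int) := by
        rw [List.count_cons]; simp; omega
      constructor
      · rintro (⟨h1, h2⟩ | ⟨h1, h2, h3⟩)
        · subst h1
          refine ⟨(hmemS i).mp (hSs ▸ List.mem_cons_self ..), ?_⟩
          rw [← hcount i, hSs, hcv]; omega
        · refine ⟨(hmemS i).mp (hSs ▸ List.mem_cons_of_mem _ h1), ?_⟩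
          rw [← hcount i, hSs, List.count_cons]
          simp [Ne.symm (ne_of_gt h2)]; omega
      · rintro ⟨h1, h2⟩
        have hiS : i ∈ v :: rest := hSs ▸ (hmemS i).mpr h1
        rw [← hcount i, hSs] at h2
        rcases List.mem_cons.mp hiS with h' | h'
        · subst h'
          exact Or.inl ⟨rfl, by rw [h2, hcv]⟩
        · by_cases hiv : i = v
          · subst hiv
            exact Or.inl ⟨rfl, by rw [h2, hcv]⟩
          · refine Or.inr ⟨h', lt_of_le_of_ne (hvrest i h') (Ne.symm hiv), ?_⟩
            rw [h2]; simp [List.count_cons, hiv, Ne.symm hiv]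
  -- equal sorted2 outputs
  have hkeyinj : Function.Injective (fun p : Int × Int => toLex (p.2, p.1)) := by
    intro a b h
    have := congrArg ofLex h
    simp at this
    exact Prod.ext this.2 this.1
  have hsorteq : PySem.List.sorted2 (S.foldl lstep []) (fun p => p.2) (fun p => p.1) false
      = PySem.List.sorted2
          ((PySem.Set.ofList F).map (fun i : Int => (i, (F.count i : Int))))
          (fun p => p.2) (fun p => p.1) false := by
    rw [sorted2_eq_sorted_lex, sorted2_eq_sorted_lex]
    exact PySem.List.sorted_eq_sorted_of_perm _ _ _ hkeyinj hpermPairs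
  simp only [hfilter, hset, ← hF, hsorteq]
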